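-- pv_equiv track=rewrite | github.com/uygartolgakara/portfolio | Codes/Python/NeutralAutomation.py | make_Xtext
-- ===== SOURCE A (Python) =====
-- def make_Xtext(x_list, label="ST/X"):
--     """While writing DCM text, make value string."""
--     Xtext = ""
--
--     for i, value in enumerate(x_list):
--
--         if i % 6 == 0:
--             Xtext += label
--
--         Xtext += "   " + str(value)
--
--         if (i+1) % 6 == 0 or i == len(x_list) - 1:
--             Xtext += "\n"
--
--     lines = Xtext.split("\n")
--     lines = ["   " + line for line in lines]
--     Xtext = "\n".join(lines)
--     Xtext = Xtext.rstrip()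
--
--     return Xtext
-- ===== SOURCE B (Python) =====
-- def make_Xtext(x_list, label="ST/X"):
--     """While writing DCM text, make value string."""
--     chunk_lines = [label + "".join("   " + str(v) for v in x_list[i:i + 6])
--                    for i in range(0, len(x_list), 6)]
--     text = "\n".join(chunk_lines)
--     indented = "\n".join("   " + line for line in text.split("\n"))
--     return indented.rstrip()
-- ===== Notes on version B (the rewrite author's own statement) =====
-- stated objective: simpler
-- what changed: B slices the list into chunks of six, builds each labeled line in one shot and joins/indents/rstrips once, replacing A's per-element modular branching, incremental string growth and newline bookkeeping.
import Mathlib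
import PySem

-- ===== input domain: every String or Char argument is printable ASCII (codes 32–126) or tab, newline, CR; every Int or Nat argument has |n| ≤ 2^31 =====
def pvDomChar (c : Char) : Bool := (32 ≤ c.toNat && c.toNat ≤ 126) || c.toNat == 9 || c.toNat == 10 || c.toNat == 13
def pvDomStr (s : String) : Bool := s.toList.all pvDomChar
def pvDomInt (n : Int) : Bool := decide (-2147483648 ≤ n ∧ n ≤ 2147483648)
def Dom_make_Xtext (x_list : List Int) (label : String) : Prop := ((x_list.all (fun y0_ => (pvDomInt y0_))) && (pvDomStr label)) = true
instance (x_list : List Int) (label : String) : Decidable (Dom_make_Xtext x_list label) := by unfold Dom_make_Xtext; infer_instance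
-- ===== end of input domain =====

-- B rebuilds the text chunk-by-chunk (slices of six, one line each) instead of A's
-- per-element mod-6 branching and incremental concatenation; objective: simpler.

-- ===== PORT A =====
def make_Xtext (x_list : List Int) (label : String) : String :=
  let Xtext : String :=
    (PySem.List.enumerate x_list).foldl (fun Xtext iv =>
      let Xtext := if PySem.Int.mod iv.1 6 == 0 then Xtext ++ label else Xtext
      let Xtext := Xtext ++ "   " ++ PySem.Int.toStr iv.2
      if PySem.Int.mod (iv.1 + 1) 6 == 0 || iv.1 == (x_list.length : Int) - 1
      then Xtext ++ "\n" else Xtext) ""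
  let lines := (PySem.Str.split? Xtext "\n").getD []
  let lines := lines.map (fun line => "   " ++ line)
  let Xtext := PySem.Str.join "\n" lines
  PySem.Str.rstrip Xtext

-- ===== PORT B =====
def make_Xtext_alt (x_list : List Int) (label : String) : String :=
  let chunk_lines := (PySem.List.pyRange 0 (x_list.length : Int) 6).map (fun i =>
    label ++ PySem.Str.join "" ((PySem.List.slice x_list (some i) (some (i + 6))).map
      (fun v => "   " ++ PySem.Int.toStr v)))
  let text := PySem.Str.join "\n" chunk_lines
  let indented := PySem.Str.join "\n"
    (((PySem.Str.split? text "\n").getD []).map (fun line => "   " ++ line))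
  PySem.Str.rstrip indented

-- ===== PRECONDITION & SPEC =====
def Spec_make_Xtext (x_list : List Int) (label : String) (out : String) : Prop := out = make_Xtext_alt x_list label
instance (x_list : List Int) (label : String) (out : String) : Decidable (Spec_make_Xtext x_list label out) := by unfold Spec_make_Xtext; infer_instance

-- ===== CLAIM (what is proved, stated in full; the proofs are below) =====
def Claim_equal_make_Xtext : Prop := ∀ (x_list : List Int) (label : String), Dom_make_Xtext x_list label → Spec_make_Xtext x_list label (make_Xtext x_list label)

-- ===== LEMMAS AND PROOFS =====

-- the body of one output line (without the label): "   v1   v2 …"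
def lineBody : List Int → String
  | [] => ""
  | v :: vs => "   " ++ PySem.Int.toStr v ++ lineBody vs

-- the list split into consecutive chunks of six
def chunks6 : List Int → List (List Int)
  | [] => []
  | x :: xs => (x :: xs.take 5) :: chunks6 (xs.drop 5)
termination_by xs => xs.length
decreasing_by simp

theorem chunks6_cons_eq (l : List Int) (h : l ≠ []) :
    chunks6 l = l.take 6 :: chunks6 (l.drop 6) := by
  cases l with
  | nil => exact absurd rfl h
  | cons x xs => simp [chunks6]

-- reference form of A's accumulated string
def rawT (lab : String) : List (List Int) → String
  | [] => ""
  | c :: cs => lab ++ lineBody c ++ "\n" ++ rawT lab cs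

-- reference unrolling of A's loop, with Prop conditions
def TA (lab : String) (n : Int) : Int → List Int → String
  | _, [] => ""
  | k, v :: rest =>
    (if k % 6 = 0 then lab else "") ++ ("   " ++ PySem.Int.toStr v) ++
    (if (k + 1) % 6 = 0 ∨ k = n - 1 then "\n" else "") ++ TA lab n (k + 1) rest

theorem foldA_eq (lab : String) (n : Int) (xs : List Int) : ∀ (k : Int) (acc : String),
    (PySem.List.enumerate xs k).foldl (fun Xtext iv =>
      let Xtext := if PySem.Int.mod iv.1 6 == 0 then Xtext ++ lab else Xtext
      let Xtext := Xtext ++ "   " ++ PySem.Int.toStr iv.2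
      if PySem.Int.mod (iv.1 + 1) 6 == 0 || iv.1 == n - 1
      then Xtext ++ "\n" else Xtext) acc
    = acc ++ TA lab n k xs := by
  induction xs with
  | nil => intro k acc; simp [PySem.List.enumerate_nil, TA]
  | cons v rest ih =>
    intro k acc
    rw [PySem.List.enumerate_cons, List.foldl_cons, ih]
    simp only [TA, PySem.Int.mod_of_nonneg _ (by norm_num : (0:Int) ≤ 6), beq_iff_eq,
      Bool.or_eq_true]
    split_ifs <;> simp [String.append_assoc]

theorem TA_eq_rawT (lab : String) (n : Int) : ∀ (xs : List Int) (k : Int),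
    k % 6 = 0 → n = k + xs.length → TA lab n k xs = rawT lab (chunks6 xs) := by
  intro xs
  induction xs using chunks6.induct with
  | case1 => intro k _ _; simp [TA, chunks6, rawT]
  | case2 a xs ih =>
    intro k hk hn
    rcases xs with _ | ⟨b, _ | ⟨c, _ | ⟨d, _ | ⟨e, _ | ⟨f, rest⟩⟩⟩⟩⟩ <;>
      simp only [TA, chunks6, rawT, lineBody, List.take, List.drop, List.length] at *
    · rw [if_pos (by omega), if_pos (by omega)]
      simp [String.append_assoc]
    · rw [if_pos (by omega), if_neg (by omega), if_neg (by omega), if_pos (by omega)]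
      simp [String.append_assoc]
    · rw [if_pos (by omega), if_neg (by omega), if_neg (by omega), if_neg (by omega),
        if_neg (by omega), if_pos (by omega)]
      simp [String.append_assoc]
    · rw [if_pos (by omega), if_neg (by omega), if_neg (by omega), if_neg (by omega),
        if_neg (by omega), if_neg (by omega), if_neg (by omega), if_pos (by omega)]
      simp [String.append_assoc]
    · rw [if_pos (by omega), if_neg (by omega), if_neg (by omega), if_neg (by omega),
        if_neg (by omega), if_neg (by omega), if_neg (by omega), if_neg (by omega),
        if_neg (by omega), if_pos (by omega)]
      simp [String.append_assoc]
    · rw [if_pos (by omega), if_neg (by omega), if_neg (by omega), if_neg (by omega),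
        if_neg (by omega), if_neg (by omega), if_neg (by omega), if_neg (by omega),
        if_neg (by omega), if_neg (by omega), if_neg (by omega), if_pos (by omega)]
      have h6 : k + 1 + 1 + 1 + 1 + 1 + 1 = k + 6 := by ring
      rw [h6, ih (k + 6) (by omega) (by push_cast at *; omega)]
      simp [String.append_assoc]

-- ----- B side: range of chunk starts = chunks6 -----

theorem pyRange6_nil (a b : Int) (h : b ≤ a) : PySem.List.pyRange a b 6 = [] := by
  rw [PySem.List.pyRange_of_pos _ _ (by norm_num : (0:Int) < 6), if_neg (by omega)]
  simp

theorem pyRange6_cons (a b : Int) (h : a < b) :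
    PySem.List.pyRange a b 6 = a :: PySem.List.pyRange (a + 6) b 6 := by
  rw [PySem.List.pyRange_of_pos _ _ (by norm_num : (0:Int) < 6),
    PySem.List.pyRange_of_pos _ _ (by norm_num : (0:Int) < 6), if_pos h]
  by_cases h2 : a + 6 < b
  · rw [if_pos h2]
    have hc : ((b - a + 6 - 1) / 6).toNat = ((b - (a + 6) + 6 - 1) / 6).toNat + 1 := by omega
    rw [hc, List.range_succ_eq_map, List.map_cons, List.map_map]
    refine congrArg₂ _ (by ring) ?_
    exact List.map_congr_left (fun k _ => by simp; ring)
  · rw [if_neg h2]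
    have hc : ((b - a + 6 - 1) / 6).toNat = 1 := by omega
    rw [hc]
    simp

theorem rangeChunks (xs : List Int) (lab : String) (j : Nat) :
    (PySem.List.pyRange (j : Int) (xs.length : Int) 6).map (fun i =>
      lab ++ PySem.Str.join "" ((PySem.List.slice xs (some i) (some (i + 6))).map
        (fun v => "   " ++ PySem.Int.toStr v)))
    = (chunks6 (xs.drop j)).map (fun c =>
        lab ++ PySem.Str.join "" (c.map (fun v => "   " ++ PySem.Int.toStr v))) := by
  suffices H : ∀ (m j : Nat), xs.length - j ≤ m →
      (PySem.List.pyRange (j : Int) (xs.length : Int) 6).map (fun i =>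
        lab ++ PySem.Str.join "" ((PySem.List.slice xs (some i) (some (i + 6))).map
          (fun v => "   " ++ PySem.Int.toStr v)))
      = (chunks6 (xs.drop j)).map (fun c =>
          lab ++ PySem.Str.join "" (c.map (fun v => "   " ++ PySem.Int.toStr v))) by
    exact H xs.length j (by omega)
  intro m
  induction m with
  | zero =>
    intro j hj
    rw [pyRange6_nil _ _ (by exact_mod_cast (by omega : xs.length ≤ j)),
      List.drop_eq_nil_of_le (by omega)]
    simp [chunks6]
  | succ m ih =>
    intro j hj
    by_cases hlt : j < xs.length
    · rw [pyRange6_cons _ _ (by exact_mod_cast hlt), List.map_cons]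
      have hstep : ((j : Int) + 6) = (((j + 6 : Nat)) : Int) := by push_cast; ring
      have hslice : PySem.List.slice xs (some (j : Int)) (some ((j : Int) + 6))
          = (xs.drop j).take 6 := by
        have := PySem.List.slice_natCast_add xs j 6
        push_cast at this ⊢
        exact this
      rw [hslice, hstep, ih (j + 6) (by omega)]
      rw [chunks6_cons_eq (xs.drop j) (by simp; omega), List.map_cons]
      rw [List.drop_drop]
    · rw [pyRange6_nil _ _ (by exact_mod_cast (by omega : xs.length ≤ j)),
        List.drop_eq_nil_of_le (by omega)]
      simp [chunks6]

theorem chJoin_empty_sep : ∀ (parts : List (List Char)), PySem.Chars.join [] parts = parts.flatten := by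
  intro parts
  induction parts with
  | nil => simp [PySem.Chars.join_nil]
  | cons p rest ih =>
    cases rest with
    | nil => simp [PySem.Chars.join_singleton]
    | cons q rest2 =>
      rw [PySem.Chars.join_cons_cons, ih]
      simp

theorem joinBody (c : List Int) :
    PySem.Str.join "" (c.map (fun v => "   " ++ PySem.Int.toStr v)) = lineBody c := by
  apply String.toList_inj.mp
  rw [PySem.Str.toList_join, show ("" : String).toList = [] from rfl, chJoin_empty_sep]
  induction c with
  | nil => simp [lineBody]
  | cons v vs ih =>
    simp only [List.map_cons, List.flatten_cons, ih]
    simp [lineBody, String.toList_append]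

-- ----- splitOn on a single newline separator -----

def mySplit : List Char → List Char → List (List Char)
  | pre, [] => [pre]
  | pre, c :: rest => if c = '\n' then pre :: mySplit [] rest else mySplit (pre ++ [c]) rest

theorem go_eq : ∀ (fuel : Nat) (l cur : List Char) (acc : List (List Char)),
    l.length < fuel →
    PySem.Chars.splitOn.go ['\n'] fuel l cur acc = acc.reverse ++ mySplit cur.reverse l := by
  intro fuel
  induction fuel with
  | zero => intro l cur acc h; omega
  | succ fuel ih =>
    intro l cur acc h
    cases l with
    | nil =>
      rw [PySem.Chars.splitOn.go.eq_def]
      simp [mySplit]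
    | cons c rest =>
      rw [PySem.Chars.splitOn.go.eq_def]
      by_cases hc : c = '\n'
      · subst hc
        have h1 : List.isPrefixOf ['\n'] ('\n' :: rest) = true := by
          simp [List.isPrefixOf]
        conv_lhs => whnf
        rw [show List.drop (['\n'].length) ('\n' :: rest) = rest from rfl]
        rw [ih rest [] (cur.reverse :: acc) (by simp at h ⊢; omega)]
        simp [mySplit]
      · have hpre : List.isPrefixOf ['\n'] (c :: rest) = false := by
          simp [List.isPrefixOf]
          exact fun hh => absurd hh.symm hc
        simp only [hpre, Bool.false_eq_true, if_false]
        rw [ih rest (c :: cur) acc (by simp at h ⊢; omega)]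
        simp [mySplit, hc]

theorem splitOn_eq_mySplit (l : List Char) :
    PySem.Chars.splitOn l ['\n'] = mySplit [] l := by
  unfold PySem.Chars.splitOn
  rw [go_eq _ _ _ _ (by omega)]
  simp

theorem mySplit_append_nl (l : List Char) : ∀ pre,
    mySplit pre (l ++ ['\n']) = mySplit pre l ++ [[]] := by
  induction l with
  | nil => intro pre; simp [mySplit]
  | cons c rest ih => intro pre; by_cases hc : c = '\n' <;> simp [mySplit, hc, ih]

theorem mySplit_ne_nil (l : List Char) : ∀ pre, mySplit pre l ≠ [] := by
  induction l with
  | nil => intro pre; simp [mySplit]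
  | cons c rest ih => intro pre; by_cases hc : c = '\n' <;> simp [mySplit, hc, ih]

theorem chJoin_append_last (sep x : List Char) : ∀ (parts : List (List Char)), parts ≠ [] →
    PySem.Chars.join sep (parts ++ [x]) = PySem.Chars.join sep parts ++ sep ++ x := by
  intro parts
  induction parts with
  | nil => intro h; exact absurd rfl h
  | cons p rest ih =>
    intro _
    cases rest with
    | nil => simp [PySem.Chars.join_cons_cons, PySem.Chars.join_singleton]
    | cons q rest2 =>
      simp only [List.cons_append, PySem.Chars.join_cons_cons]
      rw [show (q :: rest2) ++ [x] = q :: (rest2 ++ [x]) from rfl] at *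
      rw [ih (by simp)]
      simp [List.append_assoc]

theorem rstrip_append_ws (s l : List Char) (h : l.all PySem.Chars.isspace) :
    PySem.Chars.rstrip (s ++ l) = PySem.Chars.rstrip s := by
  unfold PySem.Chars.rstrip
  rw [List.reverse_append, List.dropWhile_append, if_pos]
  rw [List.isEmpty_iff, List.dropWhile_eq_nil_iff]
  intro x hx
  exact (List.all_eq_true.mp h) x (List.mem_reverse.mp hx)

-- ----- Str-level helpers -----

theorem strJoin_nil (sep : String) : PySem.Str.join sep [] = "" := by
  apply String.toList_inj.mp
  simp [PySem.Str.toList_join, PySem.Chars.join_nil]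

theorem strJoin_singleton (sep p : String) : PySem.Str.join sep [p] = p := by
  apply String.toList_inj.mp
  simp [PySem.Str.toList_join, PySem.Chars.join_singleton]

theorem strJoin_cons_cons (sep p q : String) (rest : List String) :
    PySem.Str.join sep (p :: q :: rest) = p ++ sep ++ PySem.Str.join sep (q :: rest) := by
  apply String.toList_inj.mp
  simp [PySem.Str.toList_join, PySem.Chars.join_cons_cons, String.toList_append]

def postS (s : String) : String :=
  PySem.Str.rstrip (PySem.Str.join "\n"
    (((PySem.Str.split? s "\n").getD []).map (fun line => "   " ++ line)))

theorem split_getD (s : String) :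
    (PySem.Str.split? s "\n").getD []
      = (PySem.Chars.splitOn s.toList ['\n']).map String.ofList := by
  unfold PySem.Str.split? PySem.Chars.split?
  rw [if_neg (by decide)]
  rfl

theorem rawT_eq (lab : String) : ∀ (cs : List (List Int)), cs ≠ [] →
    rawT lab cs = PySem.Str.join "\n" (cs.map (fun c => lab ++ lineBody c)) ++ "\n" := by
  intro cs
  induction cs with
  | nil => intro h; exact absurd rfl h
  | cons c rest ih =>
    intro _
    cases rest with
    | nil =>
      simp only [rawT, List.map_cons, List.map_nil, strJoin_singleton]
      simp [String.append_assoc]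
    | cons c2 rest2 =>
      have ih' := ih (by simp)
      rw [show rawT lab (c :: c2 :: rest2)
            = lab ++ lineBody c ++ "\n" ++ rawT lab (c2 :: rest2) from rfl, ih']
      simp only [List.map_cons]
      rw [strJoin_cons_cons]
      simp [String.append_assoc]

theorem postS_nl (t : String) : postS (t ++ "\n") = postS t := by
  unfold postS
  rw [split_getD, split_getD]
  rw [show (t ++ "\n").toList = t.toList ++ ['\n'] by rw [String.toList_append]; rfl]
  rw [splitOn_eq_mySplit, mySplit_append_nl, ← splitOn_eq_mySplit]
  apply String.toList_inj.mp
  rw [PySem.Str.rstrip.eq_1, PySem.Str.rstrip.eq_1, String.toList_ofList, String.toList_ofList,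
    PySem.Str.toList_join, PySem.Str.toList_join]
  simp only [List.map_append, List.map_map, List.map_singleton]
  rw [chJoin_append_last _ _ _
    (by rw [splitOn_eq_mySplit]; simp [mySplit_ne_nil])]
  rw [List.append_assoc]
  rw [rstrip_append_ws _ _ (by decide)]

theorem A_eq (xs : List Int) (lab : String) :
    make_Xtext xs lab = postS (rawT lab (chunks6 xs)) := by
  unfold make_Xtext postS
  rw [foldA_eq lab (xs.length : Int) xs 0 ""]
  rw [TA_eq_rawT lab (xs.length : Int) xs 0 (by norm_num) (by omega)]
  have he : ("" : String) ++ rawT lab (chunks6 xs) = rawT lab (chunks6 xs) := by simp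
  rw [he]

theorem B_eq (xs : List Int) (lab : String) :
    make_Xtext_alt xs lab
      = postS (PySem.Str.join "\n" ((chunks6 xs).map (fun c => lab ++ lineBody c))) := by
  unfold make_Xtext_alt postS
  have h := rangeChunks xs lab 0
  simp only [Nat.cast_zero, List.drop_zero] at h
  rw [h]
  simp only [joinBody]

theorem AB (xs : List Int) (lab : String) : make_Xtext xs lab = make_Xtext_alt xs lab := by
  rw [A_eq, B_eq]
  rcases h : chunks6 xs with _ | ⟨c, cs⟩
  · rw [rawT, List.map_nil, strJoin_nil]
  · rw [rawT_eq lab (c :: cs) (by simp), postS_nl]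

-- ===== VERDICT (by name: the statement is the Claim_ definition above) =====
theorem make_Xtext_spec : Claim_equal_make_Xtext := by
  intro xs lab _
  unfold Spec_make_Xtext
  exact AB xs lab
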